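-- pv_equiv track=rewrite | github.com/godvina/ResearchAnalyst | src/services/pipeline_monitoring_service.py | _determine_current_step
-- ===== SOURCE A (Python) =====
-- from typing import Optional
--
-- def _determine_current_step(step_statuses: dict) -> Optional[str]:
--     """Return the name of the currently running step, or None."""
--     step_order = ["parse", "extract", "embed", "graph_load", "store_artifact"]
--     for step in step_order:
--         status = step_statuses.get(step)
--         if status == "running":
--             return step
--     # If nothing is running, return the last completed step
--     for step in reversed(step_order):
--         if step_statuses.get(step) == "completed":
--             return step
--     return None
-- ===== SOURCE B (Python) =====
-- from typing import Optional
--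
-- def _determine_current_step(step_statuses: dict) -> Optional[str]:
--     """Return the name of the currently running step, or None."""
--     step_order = ["parse", "extract", "embed", "graph_load", "store_artifact"]
--     first_running = None
--     last_completed = None
--     for step in step_order:
--         status = step_statuses.get(step)
--         if first_running is None and status == "running":
--             first_running = step
--         if status == "completed":
--             last_completed = step
--     return first_running if first_running is not None else last_completed
-- ===== Notes on version B (the rewrite author's own statement) =====
-- stated objective: alternative
-- what changed: Replaces A's two scans (forward for 'running', reverse for 'completed') with a single forward pass maintaining first_running and last_completed accumulators.
import Mathlib
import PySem

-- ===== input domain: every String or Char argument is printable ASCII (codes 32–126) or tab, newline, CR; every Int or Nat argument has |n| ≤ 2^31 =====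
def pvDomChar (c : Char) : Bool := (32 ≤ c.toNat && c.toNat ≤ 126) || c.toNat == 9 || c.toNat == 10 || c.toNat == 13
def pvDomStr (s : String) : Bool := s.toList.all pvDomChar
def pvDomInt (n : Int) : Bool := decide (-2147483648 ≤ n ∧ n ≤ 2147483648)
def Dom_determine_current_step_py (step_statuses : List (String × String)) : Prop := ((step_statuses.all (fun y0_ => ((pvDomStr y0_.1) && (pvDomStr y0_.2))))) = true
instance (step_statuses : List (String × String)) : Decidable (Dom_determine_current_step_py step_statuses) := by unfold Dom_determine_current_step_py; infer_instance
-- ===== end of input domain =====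

-- B replaces A's two scans over the fixed step order with one pass keeping first_running / last_completed accumulators (alternative decomposition, same cost).


-- ===== PORT A =====
def pvStepOrder : List String := ["parse", "extract", "embed", "graph_load", "store_artifact"]

-- A's first loop: return the first step whose status is "running"
def pvALoop1 (d : PySem.Dict String String) : List String → Option String
  | [] => none
  | s :: rest => if d.get? s = some "running" then some s else pvALoop1 d rest

-- A's second loop (over reversed step_order): return the first step whose status is "completed"
def pvALoop2 (d : PySem.Dict String String) : List String → Option String
  | [] => none
  | s :: rest => if d.get? s = some "completed" then some s else pvALoop2 d rest

def determine_current_step_py (step_statuses : List (String × String)) : Option String :=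
  let d : PySem.Dict String String := PySem.Dict.ofList step_statuses
  match pvALoop1 d pvStepOrder with
  | some s => some s
  | none =>
    match pvALoop2 d pvStepOrder.reverse with
    | some s => some s
    | none => none

-- ===== PORT B =====
def determine_current_step_py_alt (step_statuses : List (String × String)) : Option String :=
  let d : PySem.Dict String String := PySem.Dict.ofList step_statuses
  let acc := pvStepOrder.foldl (fun (acc : Option String × Option String) step =>
    let status := d.get? step
    let fr := if acc.1 = none ∧ status = some "running" then some step else acc.1
    let lc := if status = some "completed" then some step else acc.2
    (fr, lc)) (none, none)
  match acc.1 with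
  | some s => some s
  | none => acc.2

-- ===== PRECONDITION & SPEC =====
def Spec_determine_current_step_py (step_statuses : List (String × String)) (out : Option String) : Prop := out = determine_current_step_py_alt step_statuses
instance (step_statuses : List (String × String)) (out : Option String) : Decidable (Spec_determine_current_step_py step_statuses out) := by unfold Spec_determine_current_step_py; infer_instance

-- ===== CLAIM (what is proved, stated in full; the proofs are below) =====
def Claim_equal_determine_current_step_py : Prop := ∀ (step_statuses : List (String × String)), Dom_determine_current_step_py step_statuses → Spec_determine_current_step_py step_statuses (determine_current_step_py step_statuses)

-- ===== LEMMAS AND PROOFS =====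

-- ===== VERDICT (by name: the statement is the Claim_ definition above) =====
-- The fold step of B, as a named function of the dict.
def pvStep (d : PySem.Dict String String) (acc : Option String × Option String) (step : String) :
    Option String × Option String :=
  let status := d.get? step
  let fr := if acc.1 = none ∧ status = some "running" then some step else acc.1
  let lc := if status = some "completed" then some step else acc.2
  (fr, lc)

theorem pvALoop2_append (d : PySem.Dict String String) (xs ys : List String) :
    pvALoop2 d (xs ++ ys) =
      match pvALoop2 d xs with
      | some s => some s
      | none => pvALoop2 d ys := by
  induction xs with
  | nil => simp [pvALoop2]
  | cons s rest ih =>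
    simp only [List.cons_append, pvALoop2]
    split_ifs <;> simp [ih]

theorem pv_fold_fst (d : PySem.Dict String String) (L : List String) :
    ∀ (fr lc : Option String),
      (L.foldl (pvStep d) (fr, lc)).1 =
        match fr with
        | some s => some s
        | none => pvALoop1 d L := by
  induction L with
  | nil => intro fr lc; cases fr <;> rfl
  | cons s rest ih =>
    intro fr lc
    cases fr with
    | some t => simp [List.foldl, pvStep, ih]
    | none =>
      simp only [List.foldl, pvStep, pvALoop1]
      split_ifs with h1 h2 h2 <;> simp_all

theorem pv_fold_snd (d : PySem.Dict String String) (L : List String) :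
    ∀ (fr lc : Option String),
      (L.foldl (pvStep d) (fr, lc)).2 =
        match pvALoop2 d L.reverse with
        | some s => some s
        | none => lc := by
  induction L with
  | nil => intro fr lc; rfl
  | cons s rest ih =>
    intro fr lc
    simp only [List.foldl, List.reverse_cons, pvALoop2_append]
    rw [ih]
    cases h : pvALoop2 d rest.reverse with
    | some t => rfl
    | none =>
      simp only [pvStep, pvALoop2]
      split_ifs <;> rfl


-- ===== VERDICT (by name: the statement is the Claim_ definition above) =====
theorem determine_current_step_py_spec : Claim_equal_determine_current_step_py := by
  intro ss _
  unfold Spec_determine_current_step_py determine_current_step_py determine_current_step_py_alt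
  have hstep : (fun (acc : Option String × Option String) step =>
      let status := (PySem.Dict.ofList ss).get? step
      let fr := if acc.1 = none ∧ status = some "running" then some step else acc.1
      let lc := if status = some "completed" then some step else acc.2
      (fr, lc)) = pvStep (PySem.Dict.ofList ss) := rfl
  simp only [hstep]
  rw [show (pvStepOrder.foldl (pvStep (PySem.Dict.ofList ss)) (none, none)).1 = _ from
    pv_fold_fst (PySem.Dict.ofList ss) pvStepOrder none none]
  cases h : pvALoop1 (PySem.Dict.ofList ss) pvStepOrder with
  | some s => rfl
  | none =>
    rw [show (pvStepOrder.foldl (pvStep (PySem.Dict.ofList ss)) (none, none)).2 = _ from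
      pv_fold_snd (PySem.Dict.ofList ss) pvStepOrder none none]
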